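-- pv_equiv track=rewrite | github.com/anna-guinet/dpa-chi-function | sim_1x3bits_to_plot_abs.py | find_rank
-- ===== SOURCE A (Python) =====
-- def find_rank(wr):
-- 	"""
-- 	Return the list of ranks for the solution kappa.
--
-- 	Parameter:
-- 	wr -- list of Decimal
--
-- 	Return:
-- 	rank -- list of integer
-- 	"""
-- 	# List of ranks
-- 	rank = []
--
-- 	# If the list is not empty, retrieve the rank in [0,1]
-- 	if wr:
--
-- 		# Count number of rank increment ('wr4' or 'wr3') and rank decrement ('wr2' or 'wr1')
-- 		counter_1 = sum(1 for tuple in wr if tuple[1] == ('wr4') or tuple[1] == ('wr3'))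
-- 		counter_2 = sum(-1 for tuple in wr if tuple[1] == ('wr2') or tuple[1] == ('wr1'))
-- 		num_wr = counter_1 + counter_2
--
-- 		rank_init = 1 + num_wr
--
-- 		rank.append(rank_init)
--
-- 		for tuple in wr:
--
-- 			# If 'wr4'or 'wr3', rank increases
-- 			if tuple[1] == ('wr4') or tuple[1] == ('wr3'):
-- 				rank.append(rank[-1] - 1)
--
-- 			# If 'wr2' or 'wr1', rank decreases
-- 			if tuple[1] == ('wr2') or tuple[1] == ('wr1'):
-- 				rank.append(rank[-1] + 1)
-- 	else:
-- 		rank = [1]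
--
-- 	return rank, wr
-- ===== SOURCE B (Python) =====
-- def find_rank(wr):
--     """Build the rank list back-to-front: the final rank is always 1 (the start
--     rank is 1 minus the net delta, so the running sum ends at 1), so no counting
--     pre-pass is needed -- one reversed pass inverting each step, then reverse."""
--     rank = [1]
--     for t in reversed(wr):
--         tag = t[1]
--         if tag in ('wr4', 'wr3'):
--             rank.append(rank[-1] + 1)
--         elif tag in ('wr2', 'wr1'):
--             rank.append(rank[-1] - 1)
--     rank.reverse()
--     return rank, wr
-- ===== Notes on version B (the rewrite author's own statement) =====
-- stated objective: alternative
-- what changed: A computes a start rank by a counting pre-pass over wr and then runs a forward branch-and-append loop; B drops the counting pass entirely, exploiting the invariant that the final rank is always 1, and builds the list back-to-front in a single reversed pass (inverting each step), then reverses it.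
import Mathlib
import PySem

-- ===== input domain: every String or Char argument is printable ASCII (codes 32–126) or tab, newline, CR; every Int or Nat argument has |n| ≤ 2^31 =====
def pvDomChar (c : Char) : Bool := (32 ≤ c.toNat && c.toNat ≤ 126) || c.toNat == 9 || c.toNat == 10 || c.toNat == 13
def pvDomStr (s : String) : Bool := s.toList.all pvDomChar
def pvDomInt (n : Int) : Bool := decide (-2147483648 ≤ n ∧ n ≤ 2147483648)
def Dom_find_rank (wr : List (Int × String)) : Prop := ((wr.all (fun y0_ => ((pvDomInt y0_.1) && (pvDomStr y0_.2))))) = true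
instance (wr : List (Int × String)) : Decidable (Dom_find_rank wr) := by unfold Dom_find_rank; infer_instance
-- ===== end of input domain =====

-- B drops A's counting pre-pass: the final rank is provably always 1, so B builds the list back-to-front in one reversed pass (alternative decomposition, same cost).


-- ===== PORT A =====
-- the 'for tuple in wr' loop: rank kept in order, appended at the end, rank[-1] read via getLast!
def findRankLoopA : List (Int × String) → List Int → List Int
  | [], rank => rank
  | t :: rest, rank =>
      let rank := if t.2 = "wr4" ∨ t.2 = "wr3" then rank ++ [rank.getLast! - 1] else rank
      let rank := if t.2 = "wr2" ∨ t.2 = "wr1" then rank ++ [rank.getLast! + 1] else rank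
      findRankLoopA rest rank

def find_rank (wr : List (Int × String)) : List Int × (List (Int × String)) :=
  if wr.isEmpty then ([1], wr)
  else
    let counter_1 : Int := wr.foldl (fun s t => if t.2 = "wr4" ∨ t.2 = "wr3" then s + 1 else s) 0
    let counter_2 : Int := wr.foldl (fun s t => if t.2 = "wr2" ∨ t.2 = "wr1" then s - 1 else s) 0
    let num_wr := counter_1 + counter_2
    let rank_init := 1 + num_wr
    (findRankLoopA wr [rank_init], wr)

-- ===== PORT B =====
-- Source B's 'for t in reversed(wr)' loop: appends rank[-1] ± 1 (the inverted step)
def findRankLoopB : List (Int × String) → List Int → List Int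
  | [], rank => rank
  | t :: rest, rank =>
      let rank := if t.2 = "wr4" ∨ t.2 = "wr3" then rank ++ [rank.getLast! + 1]
                  else if t.2 = "wr2" ∨ t.2 = "wr1" then rank ++ [rank.getLast! - 1]
                  else rank
      findRankLoopB rest rank

def find_rank_alt (wr : List (Int × String)) : List Int × (List (Int × String)) :=
  ((findRankLoopB wr.reverse [1]).reverse, wr)

-- ===== PRECONDITION & SPEC =====
def Spec_find_rank (wr : List (Int × String)) (out : List Int × (List (Int × String))) : Prop := out = find_rank_alt wr
instance (wr : List (Int × String)) (out : List Int × (List (Int × String))) : Decidable (Spec_find_rank wr out) := by unfold Spec_find_rank; infer_instance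

-- ===== CLAIM =====
def Claim_equal_find_rank : Prop := ∀ (wr : List (Int × String)), Dom_find_rank wr → Spec_find_rank wr (find_rank wr)

-- ===== LEMMAS AND PROOFS =====

-- signed deltas of the relevant tags, in traversal order (proof-only abstraction)
def fDeltas (wr : List (Int × String)) : List Int :=
  (wr.filter (fun t => t.2 = "wr1" ∨ t.2 = "wr2" ∨ t.2 = "wr3" ∨ t.2 = "wr4")).map
    (fun t => if t.2 = "wr4" ∨ t.2 = "wr3" then (-1 : Int) else 1)

-- forward prefix scan: a+d1, a+d1+d2, ...
def fScan : List Int → Int → List Int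
  | [], _ => []
  | d :: ds, a => (a + d) :: fScan ds (a + d)

-- backward scan: a-d1, a-d1-d2, ...
def bScan : List Int → Int → List Int
  | [], _ => []
  | d :: ds, a => (a - d) :: bScan ds (a - d)

lemma getLast!_append_singleton (r : List Int) (x : Int) : (r ++ [x]).getLast! = x := by
  induction r with
  | nil => rfl
  | cons h t ih => simp [List.getLast!, List.getLast?_append]

lemma deltas_cons (t : Int × String) (rest : List (Int × String)) :
    fDeltas (t :: rest) =
      if t.2 = "wr4" ∨ t.2 = "wr3" then -1 :: fDeltas rest
      else if t.2 = "wr2" ∨ t.2 = "wr1" then 1 :: fDeltas rest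
      else fDeltas rest := by
  by_cases h34 : t.2 = "wr4" ∨ t.2 = "wr3"
  · have hfilt : (t.2 = "wr1" ∨ t.2 = "wr2" ∨ t.2 = "wr3" ∨ t.2 = "wr4") := by tauto
    simp [fDeltas, hfilt, h34]
  · by_cases h12 : t.2 = "wr2" ∨ t.2 = "wr1"
    · have hfilt : (t.2 = "wr1" ∨ t.2 = "wr2" ∨ t.2 = "wr3" ∨ t.2 = "wr4") := by tauto
      simp [fDeltas, hfilt, h34, h12]
    · have hfilt : ¬ (t.2 = "wr1" ∨ t.2 = "wr2" ∨ t.2 = "wr3" ∨ t.2 = "wr4") := by tauto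
      simp [fDeltas, hfilt, h34, h12]

lemma deltas_reverse (wr : List (Int × String)) : fDeltas wr.reverse = (fDeltas wr).reverse := by
  simp [fDeltas, List.filter_reverse, List.map_reverse]

-- A's loop, started on any nonempty rank list ending in a, appends the forward scan of the deltas
lemma loopA_eq_scan (wr : List (Int × String)) :
    ∀ (r : List Int) (a : Int), r ≠ [] → r.getLast! = a →
      findRankLoopA wr r = r ++ fScan (fDeltas wr) a := by
  induction wr with
  | nil => intro r a _ _; simp [findRankLoopA, fDeltas, fScan]
  | cons t rest ih =>
    intro r a hr hlast
    rw [deltas_cons]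
    by_cases h34 : t.2 = "wr4" ∨ t.2 = "wr3"
    · have h12 : ¬ (t.2 = "wr2" ∨ t.2 = "wr1") := by rcases h34 with h | h <;> simp [h]
      have step : findRankLoopA (t :: rest) r = findRankLoopA rest (r ++ [a - 1]) := by
        simp only [findRankLoopA, if_pos h34, if_neg h12, hlast]
      rw [step, ih (r ++ [a - 1]) (a - 1) (by simp) (getLast!_append_singleton r _),
        if_pos h34, fScan]
      have : a + -1 = a - 1 := by ring
      rw [this, List.append_assoc]
      rfl
    · by_cases h12 : t.2 = "wr2" ∨ t.2 = "wr1"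
      · have step : findRankLoopA (t :: rest) r = findRankLoopA rest (r ++ [a + 1]) := by
          simp only [findRankLoopA, if_neg h34, if_pos h12, hlast]
        rw [step, ih (r ++ [a + 1]) (a + 1) (by simp) (getLast!_append_singleton r _),
          if_neg h34, if_pos h12, fScan, List.append_assoc]
        rfl
      · have step : findRankLoopA (t :: rest) r = findRankLoopA rest r := by
          simp only [findRankLoopA, if_neg h34, if_neg h12]
        rw [step, ih r a hr hlast, if_neg h34, if_neg h12]

-- B's loop, started on any nonempty rank list ending in a, appends the backward scan of the deltas
lemma loopB_eq_bScan (wr : List (Int × String)) :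
    ∀ (r : List Int) (a : Int), r ≠ [] → r.getLast! = a →
      findRankLoopB wr r = r ++ bScan (fDeltas wr) a := by
  induction wr with
  | nil => intro r a _ _; simp [findRankLoopB, fDeltas, bScan]
  | cons t rest ih =>
    intro r a hr hlast
    rw [deltas_cons]
    by_cases h34 : t.2 = "wr4" ∨ t.2 = "wr3"
    · have h12 : ¬ (t.2 = "wr2" ∨ t.2 = "wr1") := by rcases h34 with h | h <;> simp [h]
      have step : findRankLoopB (t :: rest) r = findRankLoopB rest (r ++ [a + 1]) := by
        simp only [findRankLoopB, if_pos h34, hlast]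
      rw [step, ih (r ++ [a + 1]) (a + 1) (by simp) (getLast!_append_singleton r _),
        if_pos h34, bScan]
      have : a - (-1) = a + 1 := by ring
      rw [this, List.append_assoc]
      rfl
    · by_cases h12 : t.2 = "wr2" ∨ t.2 = "wr1"
      · have step : findRankLoopB (t :: rest) r = findRankLoopB rest (r ++ [a - 1]) := by
          simp only [findRankLoopB, if_neg h34, if_pos h12, hlast]
        rw [step, ih (r ++ [a - 1]) (a - 1) (by simp) (getLast!_append_singleton r _),
          if_neg h34, if_pos h12, bScan, List.append_assoc]
        rfl
      · have step : findRankLoopB (t :: rest) r = findRankLoopB rest r := by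
          simp only [findRankLoopB, if_neg h34, if_neg h12]
        rw [step, ih r a hr hlast, if_neg h34, if_neg h12]

lemma bScan_append (xs ys : List Int) : ∀ a, bScan (xs ++ ys) a = bScan xs a ++ bScan ys (a - xs.sum) := by
  induction xs with
  | nil => intro a; simp [bScan]
  | cons d ds ih =>
    intro a
    simp only [List.cons_append, bScan, ih (a - d), List.sum_cons]
    congr 2
    ring

-- the reversed back-to-front build equals the forward prefix scan seeded at 1 - sum
lemma back_eq_forward (ds : List Int) :
    ((1 : Int) :: bScan ds.reverse 1).reverse = (1 - ds.sum) :: fScan ds (1 - ds.sum) := by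
  induction ds with
  | nil => simp [bScan, fScan]
  | cons d ds ih =>
    have h : bScan ((d :: ds).reverse) 1 = bScan ds.reverse 1 ++ [1 - ds.reverse.sum - d] := by
      rw [List.reverse_cons, bScan_append]; rfl
    have key : ((1 : Int) :: bScan ((d :: ds).reverse) 1).reverse
        = (1 - ds.reverse.sum - d) :: ((1 : Int) :: bScan ds.reverse 1).reverse := by
      rw [h]; simp
    rw [key, ih]
    simp only [List.sum_reverse, List.sum_cons, fScan]
    have h1 : 1 - ds.sum - d = 1 - (d + ds.sum) := by ring
    have h2 : 1 - (d + ds.sum) + d = 1 - ds.sum := by ring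
    rw [h1, h2]

-- A's two generator-sum counters combine to 1 - sum of the deltas
lemma init_eq (wr : List (Int × String)) :
    ∀ (s1 s2 : Int),
      1 + (wr.foldl (fun s t => if t.2 = "wr4" ∨ t.2 = "wr3" then s + 1 else s) s1
         + wr.foldl (fun s t => if t.2 = "wr2" ∨ t.2 = "wr1" then s - 1 else s) s2)
      = 1 + s1 + s2 - (fDeltas wr).sum := by
  induction wr with
  | nil => intro s1 s2; simp [fDeltas]; ring
  | cons t rest ih =>
    intro s1 s2
    simp only [List.foldl_cons]
    rw [deltas_cons]
    by_cases h34 : t.2 = "wr4" ∨ t.2 = "wr3"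
    · have h12 : ¬ (t.2 = "wr2" ∨ t.2 = "wr1") := by rcases h34 with h | h <;> simp [h]
      rw [if_pos h34, if_neg h12, ih, if_pos h34]
      simp; ring
    · by_cases h12 : t.2 = "wr2" ∨ t.2 = "wr1"
      · rw [if_neg h34, if_pos h12, ih, if_neg h34, if_pos h12]
        simp; ring
      · rw [if_neg h34, if_neg h12, ih, if_neg h34, if_neg h12]

lemma alt_closed (wr : List (Int × String)) :
    find_rank_alt wr = ((1 - (fDeltas wr).sum) :: fScan (fDeltas wr) (1 - (fDeltas wr).sum), wr) := by
  unfold find_rank_alt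
  rw [loopB_eq_bScan wr.reverse [1] 1 (by simp) rfl, deltas_reverse]
  have : ([1] ++ bScan (fDeltas wr).reverse 1) = (1 :: bScan (fDeltas wr).reverse 1) := rfl
  rw [this, back_eq_forward]

-- ===== VERDICT =====
theorem find_rank_spec : Claim_equal_find_rank := by
  intro wr _
  unfold Spec_find_rank
  rw [alt_closed]
  unfold find_rank
  by_cases h : wr.isEmpty
  · have : wr = [] := List.isEmpty_iff.mp h
    subst this
    simp [fDeltas, fScan]
  · simp only [h, Bool.false_eq_true, if_false]
    have hinit := init_eq wr 0 0
    simp only [add_zero] at hinit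
    rw [loopA_eq_scan wr _ _ (by simp) rfl, hinit]
    rfl
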